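-- pv_equiv track=rewrite | github.com/adhinuril/clustlabel | src/FrequentPhraseMining.py | extract_phrases_v2
-- ===== SOURCE A (Python) =====
-- def generate_act_idx_init(text_tokenized) :
--     act_idx = dict()
--     for i in range(len(text_tokenized)) :
--         token = text_tokenized[i]
--         if token not in act_idx :
--             act_idx[token] = []
--         act_idx[token].append(i)
--     return act_idx
--
-- def filter_act_idx(act_idx, min_count) :
--     act_idx_copy = dict(act_idx)
--     for token in act_idx_copy :
--         if (len(act_idx[token]) < min_count) :
--             del act_idx[token]
--
-- def merge_token(token1, token2) :
--     t2_tokens = token2.split(' ')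
--     last_token_idx = len(t2_tokens) - 1
--     last_token = t2_tokens[last_token_idx]
--     new_token = token1 + ' ' + last_token
--     return new_token
--
-- def generate_next_act_idx(act_idx) :
--     all_idx = []
--     all_token = []
--     for token in act_idx :
--         idxs = act_idx[token]
--         for idx in idxs :
--             all_idx.append(idx)
--             all_token.append(token)
--     next_act_idx = dict()
--     for i in range(len(all_idx)) :
--         next_idx = all_idx[i] + 1
--         if next_idx in all_idx :
--             j = all_idx.index(next_idx)
--             new_token = merge_token(all_token[i], all_token[j])
--             if new_token not in next_act_idx :
--                 next_act_idx[new_token] = []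
--             next_act_idx[new_token].append(all_idx[i])
--
--     return next_act_idx
--
-- def store_phrase_count(phrase_count, act_idx) :
--     for token in act_idx :
--         if token not in phrase_count :
--             phrase_count[token] = 0
--         phrase_count[token] += len(act_idx[token])
--
-- def extract_phrases_v2(docs_tokenized, min_count) :
--     '''
--     Note :
--     - Mengekstrak 1-gram
--     '''
--     doc_num = len(docs_tokenized)
--     doc_list = [i for i in range(doc_num)]
--     doc_del_list = []
--     phrase_count = dict()
--
--     #Initialize index active
--     docs_act_idx = []
--     for i in range(doc_num) :
--         docs_act_idx.append([])
--         act_idx_init = generate_act_idx_init(docs_tokenized[i])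
--         docs_act_idx[i].append(act_idx_init)
--
--     #Frequent Phrase Mining
--     n = 0
--     while len(doc_list) != 0 :
--         for i in doc_list :
--             n_act_idx = docs_act_idx[i][n]  #Current index active
--             filter_act_idx(n_act_idx, min_count)
--             store_phrase_count(phrase_count, n_act_idx)
--             next_act_idx = dict()
--             if (len(n_act_idx) != 0) :
--                 next_act_idx = generate_next_act_idx(n_act_idx)
--                 docs_act_idx[i].append(next_act_idx)
--             else :
--                 doc_del_list.append(i)
--         n += 1
--         #Update the document index list
--         doc_list = [i for i in doc_list if i not in doc_del_list]
--     return  phrase_count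
-- ===== SOURCE B (Python) =====
-- def extract_phrases_v2(docs_tokenized, min_count):
--     '''Position-centric frequent phrase mining: each document's state is an
--     ordered list of active start positions; the phrase at a position is
--     computed directly from the token list (the token followed by the last
--     space-separated word of each following token) instead of being built up
--     by merging strings level by level.'''
--     phrase_count = {}
--     live = []
--     for toks in docs_tokenized:
--         live.append((toks, list(range(len(toks)))))
--     n = 1  # current phrase length in tokens
--     while live:
--         nxt = []
--         for toks, pos in live:
--             groups = {}
--             for p in pos:
--                 ph = ' '.join([toks[p]] + [t.split(' ')[-1] for t in toks[p + 1:p + n]])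
--                 groups.setdefault(ph, []).append(p)
--             kept = {}
--             for ph, ps in groups.items():
--                 if len(ps) >= min_count:
--                     kept[ph] = ps
--                     phrase_count[ph] = phrase_count.get(ph, 0) + len(ps)
--             if kept:
--                 active = set()
--                 for ps in kept.values():
--                     for p in ps:
--                         active.add(p)
--                 newpos = []
--                 for ps in kept.values():
--                     for p in ps:
--                         if p + 1 in active:
--                             newpos.append(p)
--                 nxt.append((toks, newpos))
--         live = nxt
--         n += 1
--     return phrase_count
-- ===== Notes on version B (the rewrite author's own statement) =====
-- stated objective: alternative
-- what changed: B is position-centric: instead of A's per-level phrase->positions dicts carried across levels and extended by merging phrase strings with 'in'/'.index' scans over flattened position lists (plus per-document history lists and doc_list/doc_del_list bookkeeping), B keeps only an ordered list of active start positions per document, computes the phrase at a position directly from the token list (the token joined with the last space-separated words of the following tokens), regroups and counts positions in one pass per level, and tests successors with a position set.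
import Mathlib
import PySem

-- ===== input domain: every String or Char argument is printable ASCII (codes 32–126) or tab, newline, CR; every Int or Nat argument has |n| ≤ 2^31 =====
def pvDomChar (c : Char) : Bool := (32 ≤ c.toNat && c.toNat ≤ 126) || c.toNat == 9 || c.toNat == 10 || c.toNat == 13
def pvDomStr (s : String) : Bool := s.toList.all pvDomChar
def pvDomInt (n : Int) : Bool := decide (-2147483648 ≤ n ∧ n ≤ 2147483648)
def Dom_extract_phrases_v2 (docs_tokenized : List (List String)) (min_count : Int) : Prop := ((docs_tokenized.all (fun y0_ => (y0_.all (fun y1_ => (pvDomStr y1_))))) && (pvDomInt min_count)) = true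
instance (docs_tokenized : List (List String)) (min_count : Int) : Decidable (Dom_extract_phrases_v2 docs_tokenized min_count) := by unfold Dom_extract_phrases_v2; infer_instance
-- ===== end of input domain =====

-- ===== PORT A =====
-- B is position-centric: each document's state is an ordered list of active start
-- positions and the phrase at a position is computed directly from the token list,
-- instead of A's phrase->positions dicts rebuilt by string merging with list scans;
-- objective: alternative (different state representation and phrase construction).
def generate_act_idx_init (text_tokenized : List String) : PySem.Dict String (List Int) :=
  (PySem.List.pyRange 0 (text_tokenized.length : Int) 1).foldl
    (fun act_idx i =>
      let token := PySem.List.pyGetD text_tokenized i ""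
      let act_idx := if act_idx.contains token then act_idx else act_idx.insert token []
      act_idx.modify token [] (fun l => l ++ [i]))
    PySem.Dict.empty

def filter_act_idx (act_idx : PySem.Dict String (List Int)) (min_count : Int) : PySem.Dict String (List Int) :=
  act_idx.keys.foldl
    (fun d token => if ((d.getD token []).length : Int) < min_count then d.erase token else d)
    act_idx

def merge_token (token1 token2 : String) : String :=
  let t2_tokens := (PySem.Str.split? token2 " ").getD []
  let last_token_idx : Int := (t2_tokens.length : Int) - 1
  let last_token := PySem.List.pyGetD t2_tokens last_token_idx ""
  token1 ++ " " ++ last_token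

def generate_next_act_idx (act_idx : PySem.Dict String (List Int)) : PySem.Dict String (List Int) :=
  let all := act_idx.keys.foldl
    (fun (all : List Int × List String) token =>
      (act_idx.getD token []).foldl (fun all idx => (all.1 ++ [idx], all.2 ++ [token])) all)
    ([], [])
  let all_idx := all.1
  let all_token := all.2
  (PySem.List.pyRange 0 (all_idx.length : Int) 1).foldl
    (fun next_act_idx i =>
      let next_idx := PySem.List.pyGetD all_idx i 0 + 1
      if all_idx.contains next_idx then
        let j : Nat := (PySem.List.index? all_idx next_idx).getD 0
        let new_token := merge_token (PySem.List.pyGetD all_token i "") (PySem.List.pyGetD all_token (j : Int) "")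
        let next_act_idx := if next_act_idx.contains new_token then next_act_idx else next_act_idx.insert new_token []
        next_act_idx.modify new_token [] (fun l => l ++ [PySem.List.pyGetD all_idx i 0])
      else next_act_idx)
    PySem.Dict.empty

def store_phrase_count (phrase_count : PySem.Dict String Int) (act_idx : PySem.Dict String (List Int)) : PySem.Dict String Int :=
  act_idx.keys.foldl
    (fun pc token =>
      let pc := if pc.contains token then pc else pc.insert token 0
      pc.modify token 0 (fun v => v + ((act_idx.getD token []).length : Int)))
    phrase_count

/-- The `while len(doc_list) != 0` loop of A; `fuel` is a totality guard only. -/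
def fpmLoop (min_count : Int) : Nat → List Int → List Int → PySem.Dict String Int →
    List (List (PySem.Dict String (List Int))) → Int → PySem.Dict String Int
  | 0, _, _, pc, _, _ => pc
  | fuel + 1, doc_list, doc_del_list, pc, dai, n =>
    if doc_list.length ≠ 0 then
      let st := doc_list.foldl
        (fun (st : PySem.Dict String Int × List (List (PySem.Dict String (List Int))) × List Int) i =>
          let hist := PySem.List.pyGetD st.2.1 i []
          let n_act_idx := filter_act_idx (PySem.List.pyGetD hist n PySem.Dict.empty) min_count
          let hist := PySem.List.pySetD hist n n_act_idx
          let pc := store_phrase_count st.1 n_act_idx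
          if n_act_idx.size ≠ 0 then
            (pc, PySem.List.pySetD st.2.1 i (hist ++ [generate_next_act_idx n_act_idx]), st.2.2)
          else
            (pc, PySem.List.pySetD st.2.1 i hist, st.2.2 ++ [i]))
        (pc, dai, doc_del_list)
      fpmLoop min_count fuel (doc_list.filter (fun i => ! st.2.2.contains i)) st.2.2 st.1 st.2.1 (n + 1)
    else pc

def extract_phrases_v2 (docs_tokenized : List (List String)) (min_count : Int) : List (String × Int) :=
  let doc_num := (docs_tokenized.length : Int)
  let doc_list := PySem.List.pyRange 0 doc_num 1
  let dai := (PySem.List.pyRange 0 doc_num 1).foldl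
    (fun dai i => dai ++ [[generate_act_idx_init (PySem.List.pyGetD docs_tokenized i [])]]) []
  (fpmLoop min_count (docs_tokenized.foldl (fun a d => a + d.length) 0 + 2) doc_list [] PySem.Dict.empty dai 0).items

-- ===== PORT B =====
/-- `t.split(' ')[-1]` -/
def bLastword (t : String) : String :=
  PySem.List.pyGetD ((PySem.Str.split? t " ").getD []) (-1) ""

/-- `' '.join([toks[p]] + [t.split(' ')[-1] for t in toks[p+1:p+n]])` -/
def bPhraseAt (toks : List String) (n p : Int) : String :=
  PySem.Str.join " " ([PySem.List.pyGetD toks p ""] ++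
    (PySem.List.slice toks (some (p + 1)) (some (p + n))).map bLastword)

/-- the `groups` dict of one document at phrase length `n` -/
def bGroups (toks : List String) (n : Int) (pos : List Int) : PySem.Dict String (List Int) :=
  pos.foldl (fun g p => g.modify (bPhraseAt toks n p) [] (fun l => l ++ [p])) PySem.Dict.empty

/-- the body of B's `for toks, pos in live:` loop -/
def bDocStep (mc n : Int)
    (st : List (List String × List Int) × PySem.Dict String Int)
    (doc : List String × List Int) : List (List String × List Int) × PySem.Dict String Int :=
  let groups := bGroups doc.1 n doc.2
  let kp := groups.items.foldl
    (fun (s : PySem.Dict String (List Int) × PySem.Dict String Int) pr =>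
      if mc ≤ (pr.2.length : Int) then
        (s.1.insert pr.1 pr.2, s.2.insert pr.1 (s.2.getD pr.1 0 + (pr.2.length : Int)))
      else s)
    (PySem.Dict.empty, st.2)
  if kp.1.size ≠ 0 then
    let active := kp.1.items.foldl
      (fun (K : PySem.Set Int) pr => pr.2.foldl (fun K p => PySem.Set.add K p) K) PySem.Set.empty
    let newpos := kp.1.items.foldl
      (fun (np : List Int) pr =>
        pr.2.foldl (fun np p => if PySem.Set.contains active (p + 1) then np ++ [p] else np) np) []
    (st.1 ++ [(doc.1, newpos)], kp.2)
  else (st.1, kp.2)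

/-- the `while live:` loop of B; `fuel` is a totality guard only. -/
def bLoop (mc : Int) : Nat → List (List String × List Int) → Int → PySem.Dict String Int → PySem.Dict String Int
  | 0, _, _, pc => pc
  | fuel + 1, live, n, pc =>
    if live.length ≠ 0 then
      let st := live.foldl (bDocStep mc n) ([], pc)
      bLoop mc fuel st.1 (n + 1) st.2
    else pc

def extract_phrases_v2_alt (docs_tokenized : List (List String)) (min_count : Int) : List (String × Int) :=
  let live := docs_tokenized.foldl
    (fun a toks => a ++ [(toks, PySem.List.pyRange 0 (toks.length : Int) 1)]) []
  (bLoop min_count (docs_tokenized.foldl (fun a d => a + d.length) 0 + 2) live 1 PySem.Dict.empty).items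

-- ===== PRECONDITION & SPEC =====
def Spec_extract_phrases_v2 (docs_tokenized : List (List String)) (min_count : Int) (out : List (String × Int)) : Prop := out = extract_phrases_v2_alt docs_tokenized min_count
instance (docs_tokenized : List (List String)) (min_count : Int) (out : List (String × Int)) : Decidable (Spec_extract_phrases_v2 docs_tokenized min_count out) := by unfold Spec_extract_phrases_v2; infer_instance

-- ===== CLAIM (what is proved, stated in full; the proofs are below) =====
def Claim_equal_extract_phrases_v2 : Prop := ∀ (docs_tokenized : List (List String)) (min_count : Int), Dom_extract_phrases_v2 docs_tokenized min_count → Spec_extract_phrases_v2 docs_tokenized min_count (extract_phrases_v2 docs_tokenized min_count)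

-- ===== LEMMAS AND PROOFS =====

-- ---- string layer: Python str.split(' ')/' '.join facts ----
def splitSp (cs : List Char) : List (List Char) := PySem.Chars.splitOn cs [' ']

theorem go_ne_nil : ∀ (fuel : Nat) (l cur : List Char) (acc : List (List Char)),
    PySem.Chars.splitOn.go [' '] fuel l cur acc ≠ [] := by
  intro fuel
  induction fuel with
  | zero => intro l cur acc; rw [PySem.Chars.splitOn.go.eq_def]; simp
  | succ f ih =>
    intro l cur acc
    rw [PySem.Chars.splitOn.go.eq_def]
    cases l with
    | nil => simp
    | cons c rest =>
      by_cases h : [' '].isPrefixOf (c :: rest) = true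
      · simp only [h, if_true]; exact ih _ _ _
      · simp only [h]; exact ih _ _ _

theorem splitSp_ne_nil (cs : List Char) : splitSp cs ≠ [] := go_ne_nil _ _ _ _

theorem splitSp_nil : splitSp [] = [[]] := rfl

theorem go_spec : ∀ (l : List Char) (cur : List Char) (acc : List (List Char)) (fuel : Nat),
    l.length < fuel →
    PySem.Chars.splitOn.go [' '] fuel l cur acc
      = acc.reverse ++ (cur.reverse ++ (splitSp l).headD []) :: (splitSp l).tail := by
  intro l
  induction l with
  | nil =>
    intro cur acc fuel hf
    obtain ⟨f, rfl⟩ : ∃ f, fuel = f + 1 := ⟨fuel - 1, by omega⟩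
    rw [PySem.Chars.splitOn.go.eq_def]
    simp [splitSp_nil]
  | cons c rest ih =>
    intro cur acc fuel hf
    obtain ⟨f, rfl⟩ : ∃ f, fuel = f + 1 := ⟨fuel - 1, by omega⟩
    have hsplit_cons : splitSp (c :: rest)
        = if c = ' ' then [] :: splitSp rest
          else (c :: (splitSp rest).headD []) :: (splitSp rest).tail := by
      show PySem.Chars.splitOn.go [' '] ((c :: rest).length + 1) (c :: rest) [] [] = _
      rw [PySem.Chars.splitOn.go.eq_def]
      by_cases hc : c = ' '
      · have hp : [' '].isPrefixOf (c :: rest) = true := by simp [List.isPrefixOf, hc]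
        simp only [hp, if_true, List.length_cons, List.length_singleton, List.length_nil, List.drop_succ_cons,
          List.drop_zero]
        rw [ih [] [[].reverse] (rest.length + 1) (by omega)]
        rw [if_pos hc]
        cases h : splitSp rest with
        | nil => exact absurd h (splitSp_ne_nil rest)
        | cons a t => simp
      · have hp : ¬ ([' '].isPrefixOf (c :: rest) = true) := by
          simp [List.isPrefixOf]; exact fun h => hc h.symm
        simp only [hp, if_false, List.length_cons]
        rw [ih [c] [] (rest.length + 1) (by omega)]
        rw [if_neg hc]
        simp
    rw [PySem.Chars.splitOn.go.eq_def]
    by_cases hc : c = ' '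
    · have hp : [' '].isPrefixOf (c :: rest) = true := by simp [List.isPrefixOf, hc]
      simp only [hp, if_true, List.length_singleton, List.length_nil, List.drop_succ_cons, List.drop_zero]
      rw [ih [] (cur.reverse :: acc) f (by simp at hf; omega)]
      rw [hsplit_cons, if_pos hc]
      cases h : splitSp rest with
      | nil => exact absurd h (splitSp_ne_nil rest)
      | cons a t => simp
    · have hp : ¬ ([' '].isPrefixOf (c :: rest) = true) := by
        simp [List.isPrefixOf]; exact fun h => hc h.symm
      simp only [hp, if_false]
      rw [ih (c :: cur) acc f (by simp at hf; omega)]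
      rw [hsplit_cons, if_neg hc]
      simp

theorem splitSp_cons (c : Char) (rest : List Char) :
    splitSp (c :: rest)
      = if c = ' ' then [] :: splitSp rest
        else (c :: (splitSp rest).headD []) :: (splitSp rest).tail := by
  show PySem.Chars.splitOn.go [' '] ((c :: rest).length + 1) (c :: rest) [] [] = _
  rw [PySem.Chars.splitOn.go.eq_def]
  by_cases hc : c = ' '
  · have hp : [' '].isPrefixOf (c :: rest) = true := by simp [List.isPrefixOf, hc]
    simp only [hp, if_true, List.length_cons, List.length_singleton, List.length_nil, List.drop_succ_cons,
      List.drop_zero]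
    rw [go_spec rest [] [[].reverse] (rest.length + 1) (by omega)]
    rw [if_pos hc]
    cases h : splitSp rest with
    | nil => exact absurd h (splitSp_ne_nil rest)
    | cons a t => simp
  · have hp : ¬ ([' '].isPrefixOf (c :: rest) = true) := by
      simp [List.isPrefixOf]; exact fun h => hc h.symm
    simp only [hp, if_false, List.length_cons]
    rw [go_spec rest [c] [] (rest.length + 1) (by omega)]
    rw [if_neg hc]
    simp

theorem splitSp_append (a b : List Char) :
    splitSp (a ++ ' ' :: b) = splitSp a ++ splitSp b := by
  induction a with
  | nil =>
    rw [List.nil_append, splitSp_cons, if_pos rfl, splitSp_nil]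
    rfl
  | cons c a' ih =>
    rw [List.cons_append, splitSp_cons, splitSp_cons (rest := a'), ih]
    by_cases hc : c = ' '
    · simp [hc]
    · rw [if_neg hc, if_neg hc]
      cases h : splitSp a' with
      | nil => exact absurd h (splitSp_ne_nil a')
      | cons x t => simp [h]

theorem splitSp_no_space : ∀ (l : List Char), ∀ w ∈ splitSp l, ' ' ∉ w := by
  intro l
  induction l with
  | nil => intro w hw; rw [splitSp_nil] at hw; simp at hw; simp [hw]
  | cons c rest ih =>
    intro w hw
    rw [splitSp_cons] at hw
    by_cases hc : c = ' '
    · rw [if_pos hc] at hw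
      rcases List.mem_cons.mp hw with h | h
      · simp [h]
      · exact ih w h
    · rw [if_neg hc] at hw
      rcases List.mem_cons.mp hw with h | h
      · subst h
        intro hmem
        rcases List.mem_cons.mp hmem with h' | h'
        · exact hc h'.symm
        · cases hsp : splitSp rest with
          | nil => exact absurd hsp (splitSp_ne_nil rest)
          | cons x t =>
            exact ih x (by rw [hsp]; exact List.mem_cons_self) (by rw [hsp] at h'; simpa using h')
      · cases hsp : splitSp rest with
        | nil => exact absurd hsp (splitSp_ne_nil rest)
        | cons x t =>
          exact ih w (by rw [hsp]; rw [hsp] at h; exact List.mem_cons_of_mem _ h)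

theorem splitSp_of_no_space (l : List Char) (h : ' ' ∉ l) : splitSp l = [l] := by
  induction l with
  | nil => exact splitSp_nil
  | cons c rest ih =>
    have hc : c ≠ ' ' := fun hh => h (by simp [hh])
    rw [splitSp_cons, if_neg hc, ih (fun hh => h (List.mem_cons_of_mem _ hh))]
    simp

def charLast (cs : List Char) : List Char := PySem.List.pyGetD (splitSp cs) (-1) []

theorem charLast_eq_getLast (cs : List Char) : charLast cs = (splitSp cs).getLast (splitSp_ne_nil cs) := by
  unfold charLast
  rw [PySem.List.pyGetD_neg_one _ _ (splitSp_ne_nil cs)]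


theorem charLast_append (a b : List Char) : charLast (a ++ ' ' :: b) = charLast b := by
  rw [charLast_eq_getLast, charLast_eq_getLast]
  rw [List.getLast_congr _ (by simp [splitSp_ne_nil]) (splitSp_append a b)]
  exact List.getLast_append_of_ne_nil _ (splitSp_ne_nil b)

theorem charLast_no_space (w : List Char) (h : ' ' ∉ w) : charLast w = w := by
  rw [charLast_eq_getLast, List.getLast_congr _ (by simp) (splitSp_of_no_space w h)]
  rfl

theorem charLast_idem (l : List Char) : charLast (charLast l) = charLast l := by
  apply charLast_no_space
  exact splitSp_no_space l _ (by rw [charLast_eq_getLast]; exact List.getLast_mem _)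

theorem charLast_join : ∀ (ws : List (List Char)) (w : List Char),
    charLast (PySem.Chars.join [' '] (w :: ws)) = charLast ((w :: ws).getLast (by simp)) := by
  intro ws
  induction ws with
  | nil => intro w; rw [PySem.Chars.join_singleton]; rfl
  | cons x t ih =>
    intro w
    rw [PySem.Chars.join_cons_cons]
    have h1 : w ++ [' '] ++ PySem.Chars.join [' '] (x :: t) = w ++ ' ' :: PySem.Chars.join [' '] (x :: t) := by
      simp
    rw [h1, charLast_append, ih x]
    have h2 := List.getLast_cons (a := w) (l := x :: t) (by simp)
    rw [h2]

theorem join_snoc : ∀ (ws : List (List Char)) (w x : List Char),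
    PySem.Chars.join [' '] ((w :: ws) ++ [x]) = PySem.Chars.join [' '] (w :: ws) ++ ' ' :: x := by
  intro ws
  induction ws with
  | nil =>
    intro w x
    rw [List.cons_append, List.nil_append, PySem.Chars.join_cons_cons, PySem.Chars.join_singleton]
    simp
  | cons y t ih =>
    intro w x
    have ihx := ih y x
    simp only [List.cons_append] at ihx ⊢
    rw [PySem.Chars.join_cons_cons, ihx, PySem.Chars.join_cons_cons]
    simp

theorem bLastword_toList (t : String) : (bLastword t).toList = charLast t.toList := by
  unfold bLastword
  have h1 : PySem.Str.split? t " " = some ((splitSp t.toList).map String.ofList) := by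
    simp [PySem.Str.split?, PySem.Chars.split?, splitSp]
  rw [h1]
  show (PySem.List.pyGetD ((splitSp t.toList).map String.ofList) (-1) "").toList = _
  have h2 : ("" : String) = String.ofList [] := rfl
  rw [h2, PySem.List.pyGetD_map String.ofList _ (-1) [], String.toList_ofList]
  rfl

theorem str_join_toList (parts : List String) :
    (PySem.Str.join " " parts).toList = PySem.Chars.join [' '] (parts.map String.toList) := by
  show (String.ofList (PySem.Chars.join (" ").toList (parts.map String.toList))).toList = _
  rw [String.toList_ofList]
  rfl

theorem phrase_one (toks : List String) (p : Int) (hp : 0 ≤ p) :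
    bPhraseAt toks 1 p = PySem.List.pyGetD toks p "" := by
  unfold bPhraseAt
  have h1 : PySem.List.slice toks (some (p + 1)) (some (p + 1)) = [] := by
    have : p + 1 = ((p.toNat + 1 : Nat) : Int) := by omega
    rw [this, PySem.List.slice_natCast]
    simp
  rw [h1]
  apply String.ext_iff.mpr
  rw [show ([PySem.List.pyGetD toks p ""] ++ ([] : List String).map bLastword) = [PySem.List.pyGetD toks p ""] from by simp]
  rw [str_join_toList]
  rw [show [PySem.List.pyGetD toks p ""].map String.toList = [(PySem.List.pyGetD toks p "").toList] from rfl]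
  rw [PySem.Chars.join_singleton]

theorem phrase_merge (toks : List String) (n p : Int) (hn : 1 ≤ n) (hp : 0 ≤ p)
    (hb : p.toNat + n.toNat < toks.length) :
    bPhraseAt toks n p ++ " " ++ bLastword (bPhraseAt toks n (p + 1)) = bPhraseAt toks (n + 1) p := by
  set k := p.toNat with hk
  set m := n.toNat with hm
  have hm1 : 1 ≤ m := by omega
  have hkm : k + m < toks.length := hb
  have htk : PySem.List.pyGetD toks ((k + m : Nat) : Int) "" = toks[k + m]'hkm := by
    rw [PySem.List.pyGetD_of_nonneg _ _ (by positivity), Int.toNat_natCast]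
    exact List.getD_eq_getElem _ _ hkm
  -- slice computations
  have s1 : PySem.List.slice toks (some (p + 1)) (some (p + n)) = (toks.drop (k + 1)).take (m - 1) := by
    rw [show p + 1 = ((k + 1 : Nat) : Int) from by omega, show p + n = ((k + m : Nat) : Int) from by omega,
      PySem.List.slice_natCast]
    congr 1
    omega
  have s2 : PySem.List.slice toks (some (p + 1)) (some (p + (n + 1))) = (toks.drop (k + 1)).take m := by
    rw [show p + 1 = ((k + 1 : Nat) : Int) from by omega, show p + (n + 1) = ((k + 1 + m : Nat) : Int) from by omega,
      PySem.List.slice_natCast]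
    congr 1
    omega
  have s3 : PySem.List.slice toks (some (p + 1 + 1)) (some (p + 1 + n)) = (toks.drop (k + 2)).take (m - 1) := by
    rw [show p + 1 + 1 = ((k + 2 : Nat) : Int) from by omega, show p + 1 + n = ((k + 2 + (m - 1) : Nat) : Int) from by omega,
      PySem.List.slice_natCast]
    congr 1
    omega
  have hdropget : (toks.drop (k + 1))[m - 1]? = some (toks[k + m]'hkm) := by
    rw [List.getElem?_drop]
    rw [show k + 1 + (m - 1) = k + m from by omega]
    exact List.getElem?_eq_getElem hkm
  have htake : (toks.drop (k + 1)).take m = (toks.drop (k + 1)).take (m - 1) ++ [toks[k + m]'hkm] := by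
    conv_lhs => rw [show m = m - 1 + 1 from by omega]
    rw [List.take_succ, hdropget]
    rfl
  -- last-word of the phrase at p+1
  have hlast : (bLastword (bPhraseAt toks n (p + 1))).toList = (bLastword (toks[k + m]'hkm)).toList := by
    rw [bLastword_toList, bLastword_toList]
    unfold bPhraseAt
    rw [s3, str_join_toList]
    simp only [List.singleton_append, List.map_cons]
    rw [charLast_join]
    by_cases hm2 : m = 1
    · have hnil : (toks.drop (k + 2)).take (m - 1) = [] := by rw [hm2]; simp
      rw [hnil]
      simp only [List.map_nil, List.getLast_singleton]
      have hpe : PySem.List.pyGetD toks (p + 1) "" = toks[k + m]'hkm := by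
        rw [show p + 1 = ((k + m : Nat) : Int) from by omega]
        exact htk
      rw [hpe]
    · have hm2' : 2 ≤ m := by omega
      have hlen : ((toks.drop (k + 2)).take (m - 1)).length = m - 1 := by
        rw [List.length_take, List.length_drop]
        omega
      have hne : ((toks.drop (k + 2)).take (m - 1)) ≠ [] := by
        intro h; rw [h] at hlen; simp at hlen; omega
      have hne2 : (((toks.drop (k + 2)).take (m - 1)).map bLastword).map String.toList ≠ [] := by
        simp only [ne_eq, List.map_eq_nil_iff]
        exact hne
      rw [List.getLast_cons hne2]
      rw [List.getLast_map, List.getLast_map]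
      have hgl : ((toks.drop (k + 2)).take (m - 1)).getLast hne = toks[k + m]'hkm := by
        rw [List.getLast_eq_getElem]
        rw [List.getElem_take, List.getElem_drop]
        congr 1
        rw [List.length_take, List.length_drop]
        omega
      rw [hgl]
      rw [bLastword_toList]
      exact charLast_idem _
  -- assemble
  apply String.ext_iff.mpr
  rw [String.toList_append, String.toList_append]
  rw [hlast]
  unfold bPhraseAt
  rw [s1, s2, htake, str_join_toList, str_join_toList]
  rw [show ((toks.drop (k + 1)).take (m - 1) ++ [toks[k + m]'hkm]).map bLastword
      = (((toks.drop (k + 1)).take (m - 1)).map bLastword) ++ [bLastword (toks[k + m]'hkm)] from by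
    rw [List.map_append]; rfl]
  rw [show ([PySem.List.pyGetD toks p ""] ++ (((toks.drop (k + 1)).take (m - 1)).map bLastword ++ [bLastword (toks[k + m]'hkm)])).map String.toList
      = ((PySem.List.pyGetD toks p "").toList :: (((toks.drop (k + 1)).take (m - 1)).map bLastword).map String.toList) ++ [(bLastword (toks[k + m]'hkm)).toList] from by
    simp]
  rw [join_snoc]
  simp only [List.singleton_append, List.map_cons]
  rw [show (" " : String).toList = [' '] from by decide]
  simp

-- ---- generic dict/fold lemmas shared by both sides ----

theorem setdefault_modify {ν : Type} (d : PySem.Dict String ν) (k : String) (dflt : ν) (f : ν → ν) :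
    ((if d.contains k then d else d.insert k dflt).modify k dflt f) = d.modify k dflt f := by
  by_cases h : d.contains k
  · simp [h]
  · simp only [h, Bool.false_eq_true, ite_false, PySem.Dict.modify]
    rw [PySem.Dict.getD_insert_self, PySem.Dict.insert_insert_self,
      PySem.Dict.getD_of_not_contains _ _ (by simpa using h)]

theorem filtFold_items (mc : Int) : ∀ (ks : List String) (d : PySem.Dict String (List Int)),
    ks.Nodup → d.keys.Nodup →
    (ks.foldl (fun d token => if ((d.getD token []).length : Int) < mc then d.erase token else d) d).items
      = d.items.filter (fun p => !(decide (p.1 ∈ ks) && decide ((p.2.length : Int) < mc))) := by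
  intro ks
  induction ks with
  | nil => intro d _ _; simp
  | cons t ks' ih =>
    intro d hks hd
    have hget : ∀ p ∈ d.items, p.1 = t → p.2 = d.getD t [] := by
      intro p hp hpt
      obtain ⟨p1, p2⟩ := p
      simp only at hpt
      subst hpt
      have := PySem.Dict.getD_of_mem_items d hp hd []
      simp [this]
    simp only [List.foldl_cons]
    by_cases hsmall : ((d.getD t []).length : Int) < mc
    · rw [if_pos hsmall]
      have herase_keys : (d.erase t).keys.Nodup := by
        have : (d.erase t).items.Sublist d.items := by
          simp only [PySem.Dict.erase]; exact List.filter_sublist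
        exact (List.Sublist.map Prod.fst this).nodup (by exact hd)
      rw [ih _ (hks.of_cons) herase_keys]
      simp only [PySem.Dict.erase]
      rw [List.filter_filter]
      apply List.filter_congr
      intro p hp
      by_cases hpt : p.1 = t
      · have := hget p hp hpt
        simp [hpt, this, hsmall]
      · simp [hpt]
    · rw [if_neg hsmall]
      rw [ih _ hks.of_cons hd]
      apply List.filter_congr
      intro p hp
      by_cases hpt : p.1 = t
      · have := hget p hp hpt
        have htks' : t ∉ ks' := (List.nodup_cons.mp hks).1
        simp [hpt, this, hsmall, htks']
      · simp [hpt]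

theorem keysfold_eq_itemsfold {ν β : Type} (d : PySem.Dict String ν) (dflt : ν)
    (g : β → String → ν → β) (init : β) (hd : d.keys.Nodup) :
    d.keys.foldl (fun s t => g s t (d.getD t dflt)) init
      = d.items.foldl (fun s p => g s p.1 p.2) init := by
  conv_rhs => rw [PySem.Dict.items_eq_map_keys d hd dflt]
  rw [List.foldl_map]

theorem foldl_pair_split {α β γ : Type} (l : List γ) (f1 : α → γ → α) (f2 : β → γ → β)
    (a : α) (b : β) :
    l.foldl (fun s p => (f1 s.1 p, f2 s.2 p)) (a, b) = (l.foldl f1 a, l.foldl f2 b) := by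
  induction l generalizing a b with
  | nil => rfl
  | cons x xs ih => simp [List.foldl_cons, ih]

theorem store_eq (pc : PySem.Dict String Int) (f : PySem.Dict String (List Int)) (hf : f.keys.Nodup) :
    (f.keys.foldl (fun pc token =>
      let pc' := if pc.contains token then pc else pc.insert token 0
      pc'.modify token 0 (fun v => v + ((f.getD token []).length : Int))) pc)
    = f.items.foldl (fun pc p => pc.insert p.1 (pc.getD p.1 0 + (p.2.length : Int))) pc := by
  rw [keysfold_eq_itemsfold f [] (fun s t v =>
    (if s.contains t then s else s.insert t 0).modify t 0 (fun x => x + (v.length : Int))) pc hf]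
  apply PySem.List.foldl_congr_mem
  intro pc p _
  show (if pc.contains p.1 then pc else pc.insert p.1 0).modify p.1 0 (fun v => v + ((p.2.length : Int))) = _
  by_cases h : pc.contains p.1
  · simp only [h, ite_true]; rfl
  · simp only [h, Bool.false_eq_true, ite_false, PySem.Dict.modify]
    rw [PySem.Dict.getD_insert_self, PySem.Dict.insert_insert_self,
      PySem.Dict.getD_of_not_contains _ _ (by simpa using h)]

def keepB (mc : Int) (p : String × List Int) : Bool := decide (mc ≤ (p.2.length : Int))

/-- the (position, phrase) pairs of a level dict, in iteration order -/
def pairsOf (l : List (String × List Int)) : List (Int × String) :=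
  l.flatMap (fun p => p.2.map (fun q => (q, p.1)))

theorem filter_act_idx_eq (act : PySem.Dict String (List Int)) (mc : Int) (h : act.keys.Nodup) :
    filter_act_idx act mc = PySem.Dict.mk (act.items.filter (keepB mc)) := by
  apply PySem.Dict.ext
  show (act.keys.foldl _ act).items = _
  rw [filtFold_items mc act.keys act h h]
  apply List.filter_congr
  intro p hp
  have : p.1 ∈ act.keys := PySem.Dict.mem_keys_of_mem_items _ hp
  simp only [this, decide_true, Bool.true_and, keepB]
  by_cases hc : (mc ≤ (p.2.length : Int)) <;> simp [hc] <;> omega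

theorem nodup_keys_filter (act : PySem.Dict String (List Int)) (c : (String × List Int) → Bool)
    (h : act.keys.Nodup) : (PySem.Dict.mk (act.items.filter c)).keys.Nodup :=
  (List.Sublist.map Prod.fst (List.filter_sublist)).nodup h

theorem foldl_pairsOf {γ : Type} (l : List (String × List Int)) (g : γ → Int → String → γ) (init : γ) :
    l.foldl (fun s p => p.2.foldl (fun s q => g s q p.1) s) init
      = (pairsOf l).foldl (fun s pr => g s pr.1 pr.2) init := by
  induction l generalizing init with
  | nil => rfl
  | cons p rest ih =>
    simp only [List.foldl_cons, pairsOf, List.flatMap_cons, List.foldl_append]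
    rw [show (List.flatMap (fun p => p.2.map (fun q => (q, p.1))) rest) = pairsOf rest from rfl, ih]
    congr 1
    rw [List.foldl_map]

theorem all_eq (f : PySem.Dict String (List Int)) (hf : f.keys.Nodup) :
    (f.keys.foldl
      (fun (all : List Int × List String) token =>
        (f.getD token []).foldl (fun all idx => (all.1 ++ [idx], all.2 ++ [token])) all)
      ([], []))
    = ((pairsOf f.items).map Prod.fst, (pairsOf f.items).map Prod.snd) := by
  rw [keysfold_eq_itemsfold f [] (fun (s : List Int × List String) t v =>
    v.foldl (fun all idx => (all.1 ++ [idx], all.2 ++ [t])) s) ([], []) hf]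
  rw [foldl_pairsOf f.items (fun s q tok => (s.1 ++ [q], s.2 ++ [tok])) ([], [])]
  rw [foldl_pair_split (pairsOf f.items) (fun a pr => a ++ [pr.1]) (fun b pr => b ++ [pr.2]) [] []]
  rw [PySem.List.foldl_append_singleton_eq_map Prod.fst _ [],
    PySem.List.foldl_append_singleton_eq_map Prod.snd _ []]
  simp

theorem pyGetD_len_sub_one {α : Type} (l : List α) (d : α) :
    PySem.List.pyGetD l ((l.length : Int) - 1) d = PySem.List.pyGetD l (-1) d := by
  cases l with
  | nil => rfl
  | cons x xs =>
    have hne : x :: xs ≠ [] := by simp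
    rw [PySem.List.pyGetD_neg_one _ d hne]
    have h0 : (0 : Int) ≤ ((x :: xs).length : Int) - 1 := by simp
    rw [PySem.List.pyGetD_of_nonneg _ _ h0]
    have : (((x :: xs).length : Int) - 1).toNat = (x :: xs).length - 1 := by omega
    rw [this, List.getLast_eq_getElem]
    rw [List.getD_eq_getElem _ _ (by simp)]
    rfl

theorem merge_eq (t1 t2 : String) : merge_token t1 t2 = t1 ++ " " ++ bLastword t2 := by
  show t1 ++ " " ++ PySem.List.pyGetD ((PySem.Str.split? t2 " ").getD [])
    ((((PySem.Str.split? t2 " ").getD []).length : Int) - 1) "" = _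
  rw [pyGetD_len_sub_one]
  rfl

/-- the body of A's next-level fold, expressed on a (position, phrase) pair -/
def FA (P : List (Int × String)) (nd : PySem.Dict String (List Int)) (pr : Int × String) :
    PySem.Dict String (List Int) :=
  if (P.map Prod.fst).contains (pr.1 + 1) then
    let j : Nat := (PySem.List.index? (P.map Prod.fst) (pr.1 + 1)).getD 0
    let new_token := merge_token pr.2 (PySem.List.pyGetD (P.map Prod.snd) (j : Int) "")
    (if nd.contains new_token then nd else nd.insert new_token []).modify new_token []
      (fun l => l ++ [pr.1])
  else nd

def GA (P : List (Int × String)) (all : List Int × List String) : PySem.Dict String (List Int) :=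
  (PySem.List.pyRange 0 (all.1.length : Int) 1).foldl
    (fun next_act_idx i =>
      let next_idx := PySem.List.pyGetD all.1 i 0 + 1
      if all.1.contains next_idx then
        let j : Nat := (PySem.List.index? all.1 next_idx).getD 0
        let new_token := merge_token (PySem.List.pyGetD all.2 i "") (PySem.List.pyGetD all.2 (j : Int) "")
        let next_act_idx := if next_act_idx.contains new_token then next_act_idx else next_act_idx.insert new_token []
        next_act_idx.modify new_token [] (fun l => l ++ [PySem.List.pyGetD all.1 i 0])
      else next_act_idx)
    PySem.Dict.empty

theorem genfold_eq (P : List (Int × String)) :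
    GA P (P.map Prod.fst, P.map Prod.snd) = P.foldl (FA P) PySem.Dict.empty := by
  unfold GA
  have hb : (fun (nd : PySem.Dict String (List Int)) i =>
      let next_idx := PySem.List.pyGetD ((P.map Prod.fst, P.map Prod.snd).1) i 0 + 1
      if ((P.map Prod.fst, P.map Prod.snd).1).contains next_idx then
        let j : Nat := (PySem.List.index? ((P.map Prod.fst, P.map Prod.snd).1) next_idx).getD 0
        let new_token := merge_token (PySem.List.pyGetD ((P.map Prod.fst, P.map Prod.snd).2) i "")
          (PySem.List.pyGetD ((P.map Prod.fst, P.map Prod.snd).2) (j : Int) "")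
        let nd' := if nd.contains new_token then nd else nd.insert new_token []
        nd'.modify new_token [] (fun l => l ++ [PySem.List.pyGetD ((P.map Prod.fst, P.map Prod.snd).1) i 0])
      else nd)
      = (fun nd i => FA P nd (PySem.List.pyGetD P i (0, ""))) := by
    funext nd i
    have e1 : PySem.List.pyGetD (P.map Prod.fst) i 0
        = (PySem.List.pyGetD P i (0, "")).1 :=
      PySem.List.pyGetD_map Prod.fst P i (0, "")
    have e2 : PySem.List.pyGetD (P.map Prod.snd) i ""
        = (PySem.List.pyGetD P i (0, "")).2 :=
      PySem.List.pyGetD_map Prod.snd P i (0, "")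
    show (let next_idx := PySem.List.pyGetD (P.map Prod.fst) i 0 + 1
      if (P.map Prod.fst).contains next_idx then
        let j : Nat := (PySem.List.index? (P.map Prod.fst) next_idx).getD 0
        let new_token := merge_token (PySem.List.pyGetD (P.map Prod.snd) i "")
          (PySem.List.pyGetD (P.map Prod.snd) (j : Int) "")
        let nd' := if nd.contains new_token then nd else nd.insert new_token []
        nd'.modify new_token [] (fun l => l ++ [PySem.List.pyGetD (P.map Prod.fst) i 0])
      else nd) = _
    rw [e1, e2]
    rfl
  rw [hb]
  have hlen : (((P.map Prod.fst, P.map Prod.snd).1).length : Int) = PySem.List.len P := by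
    simp [PySem.List.len_eq]
  rw [show ((P.map Prod.fst, P.map Prod.snd).1.length : Int) = PySem.List.len P from hlen]
  rw [PySem.List.foldl_pyRange_pyGetD P (0, "") (FA P) PySem.Dict.empty (le_refl 0)]
  simp

theorem map_fst_pairsOf (l : List (String × List Int)) :
    (pairsOf l).map Prod.fst = (l.map Prod.snd).flatten := by
  induction l with
  | nil => rfl
  | cons p rest ih =>
    simp only [pairsOf, List.flatMap_cons, List.map_append, List.map_map, List.map_cons,
      List.flatten_cons]
    rw [show List.flatMap (fun p => p.2.map (fun q => (q, p.1))) rest = pairsOf rest from rfl, ih]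
    congr 1
    simp [Function.comp_def]

theorem count_flatten_replace : ∀ (l : List (String × List Int)) (k : String) (v q : Int),
    (l.map Prod.fst).Nodup → k ∈ l.map Prod.fst →
    ((l.map (fun p => if p.1 == k then (k, (PySem.Dict.mk l).getD k [] ++ [v]) else p)).map
      Prod.snd).flatten.count q
      = (l.map Prod.snd).flatten.count q + (if v = q then 1 else 0) := by
  intro l
  induction l with
  | nil => intro k v q _ h; simp at h
  | cons p rest ih =>
    intro k v q hnd hk
    have hgd : (PySem.Dict.mk (p :: rest)).getD k []
        = if p.1 == k then p.2 else (PySem.Dict.mk rest).getD k [] := by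
      obtain ⟨a, b⟩ := p
      simp only [PySem.Dict.getD, PySem.Dict.get?_mk_cons]
      by_cases h : a = k <;> simp [h]
    by_cases hp : p.1 = k
    · have hknr : k ∉ rest.map Prod.fst := by
        rw [← hp]; exact (List.nodup_cons.mp (by simpa using hnd)).1
      have hrest : rest.map (fun p' => if p'.1 == k then (k, (PySem.Dict.mk (p :: rest)).getD k [] ++ [v]) else p') = rest := by
        conv_rhs => rw [← List.map_id rest]
        apply List.map_congr_left
        intro x hx
        have : x.1 ≠ k := fun h => hknr (h ▸ List.mem_map_of_mem hx)
        simp [this]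
      rw [show ((p :: rest).map (fun p' => if p'.1 == k then (k, (PySem.Dict.mk (p :: rest)).getD k [] ++ [v]) else p')) = (k, p.2 ++ [v]) :: rest from by
        rw [List.map_cons, hrest]; simp [hp, hgd]]
      simp only [List.map_cons, List.flatten_cons, List.count_append]
      by_cases hv : v = q <;> simp [hv] <;> omega
    · have hkr : k ∈ rest.map Prod.fst := by
        rcases (by simpa using hk) with h | h
        · exact absurd h.symm hp
        · simpa using h
      have hnd' : (rest.map Prod.fst).Nodup := (List.nodup_cons.mp (by simpa using hnd)).2
      have := ih k v q hnd' hkr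
      simp only [List.map_cons, beq_iff_eq, hp, if_false]
      simp only [List.flatten_cons, List.count_append]
      rw [show (PySem.Dict.mk (p :: rest)).getD k [] = (PySem.Dict.mk rest).getD k [] by
        rw [hgd]; simp [hp]]
      simp only [beq_iff_eq] at this
      omega

theorem count_flatten_modify (d : PySem.Dict String (List Int)) (k : String) (v q : Int)
    (hd : d.keys.Nodup) :
    ((d.modify k [] (fun l => l ++ [v])).values.flatten).count q
      = (d.values.flatten).count q + (if v = q then 1 else 0) := by
  show ((d.insert k (d.getD k [] ++ [v])).values.flatten).count q = _
  by_cases hc : d.contains k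
  · rw [PySem.Dict.values, PySem.Dict.items_insert_of_contains _ _ hc]
    have hk : k ∈ d.items.map Prod.fst := by
      have := (PySem.Dict.contains_iff_mem_keys d k).mp hc
      simpa [PySem.Dict.keys] using this
    have := count_flatten_replace d.items k v q (by simpa [PySem.Dict.keys] using hd) hk
    simpa [PySem.Dict.values] using this
  · rw [PySem.Dict.values, PySem.Dict.items_insert_of_not_contains _ _ (by simpa using hc)]
    rw [PySem.Dict.getD_of_not_contains _ _ (by simpa using hc)]
    simp only [PySem.Dict.values, List.map_append, List.flatten_append, List.count_append,
      List.map_cons, List.map_nil, List.flatten_cons, List.flatten_nil, List.append_nil,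
      List.nil_append]
    by_cases hv : v = q <;> simp [hv]

theorem count_flatten_foldl_modify : ∀ (l : List (Int × String)) (d : PySem.Dict String (List Int)),
    d.keys.Nodup → ∀ q : Int,
    ((l.foldl (fun d pt => d.modify pt.2 [] (fun x => x ++ [pt.1])) d).values.flatten).count q
      = (d.values.flatten).count q + (l.map Prod.fst).count q := by
  intro l
  induction l with
  | nil => intro d _ q; simp
  | cons pt rest ih =>
    intro d hd q
    have hd' : (d.modify pt.2 [] (fun x => x ++ [pt.1])).keys.Nodup :=
      PySem.Dict.nodup_keys_insert d pt.2 _ hd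
    simp only [List.foldl_cons]
    rw [ih _ hd' q, count_flatten_modify d pt.2 pt.1 q hd]
    simp only [List.map_cons, List.count_cons]
    by_cases hv : pt.1 = q <;> simp [hv] <;> omega


-- ---- B's grouping dict: characterization ----

theorem groups_as_pairfold (toks : List String) (n : Int) (pos : List Int) :
    bGroups toks n pos
      = (pos.map (fun p => (bPhraseAt toks n p, p))).foldl
          (fun d pr => d.modify pr.1 [] (fun l => l ++ [pr.2])) PySem.Dict.empty := by
  unfold bGroups
  rw [List.foldl_map]

theorem groups_getD (toks : List String) (n : Int) (pos : List Int) (s : String) :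
    (bGroups toks n pos).getD s [] = pos.filter (fun p => bPhraseAt toks n p == s) := by
  rw [groups_as_pairfold, PySem.Dict.getD_foldl_modify_append]
  rw [PySem.Dict.getD_empty]
  rw [List.filter_map]
  simp [Function.comp_def]

theorem groups_keys_nodup (toks : List String) (n : Int) (pos : List Int) :
    (bGroups toks n pos).keys.Nodup :=
  PySem.Dict.nodup_keys_foldl_modify_key pos (bPhraseAt toks n) [] (fun _ p => fun l => l ++ [p])
    PySem.Dict.empty (by simp [PySem.Dict.empty, PySem.Dict.keys])

theorem groups_flatten_nodup (toks : List String) (n : Int) (pos : List Int) (hnd : pos.Nodup) :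
    (bGroups toks n pos).values.flatten.Nodup := by
  have h : bGroups toks n pos
      = (pos.map (fun p => (p, bPhraseAt toks n p))).foldl
          (fun d pt => d.modify pt.2 [] (fun x => x ++ [pt.1])) PySem.Dict.empty := by
    unfold bGroups
    rw [List.foldl_map]
  rw [h, List.nodup_iff_count_le_one]
  intro q
  rw [count_flatten_foldl_modify _ _ (by simp [PySem.Dict.empty, PySem.Dict.keys]) q]
  have : ((pos.map (fun p => (p, bPhraseAt toks n p))).map Prod.fst).count q ≤ 1 := by
    rw [List.map_map]
    simp only [Function.comp_def]
    rw [show pos.map (fun p => p) = pos from List.map_id pos]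
    exact List.nodup_iff_count_le_one.mp hnd q
  simpa [PySem.Dict.empty, PySem.Dict.values] using this

theorem groups_mem_pairs (toks : List String) (n : Int) (pos : List Int)
    (pr : Int × String) (hpr : pr ∈ pairsOf (bGroups toks n pos).items) :
    pr.2 = bPhraseAt toks n pr.1 ∧ pr.1 ∈ pos := by
  obtain ⟨it, hit, hmem⟩ := List.mem_flatMap.mp hpr
  obtain ⟨q, hq, rfl⟩ := List.mem_map.mp hmem
  have hgd := PySem.Dict.getD_of_mem_items _ hit (groups_keys_nodup toks n pos) []
  rw [groups_getD] at hgd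
  rw [← hgd] at hq
  obtain ⟨hqpos, hkey⟩ := List.mem_filter.mp hq
  refine ⟨?_, hqpos⟩
  exact (by simpa using hkey : bPhraseAt toks n q = it.1).symm

-- ---- the kept dict and the new position list (proof-side names for B's values) ----

def bKeptD (mc n : Int) (toks : List String) (pos : List Int) : PySem.Dict String (List Int) :=
  PySem.Dict.mk ((bGroups toks n pos).items.filter (keepB mc))

def bNewpos (mc n : Int) (toks : List String) (pos : List Int) : List Int :=
  ((pairsOf (bKeptD mc n toks pos).items).filter
    (fun pr => ((pairsOf (bKeptD mc n toks pos).items).map Prod.fst).contains (pr.1 + 1))).map Prod.fst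

theorem kept_keys_nodup (mc n : Int) (toks : List String) (pos : List Int) :
    (bKeptD mc n toks pos).keys.Nodup :=
  nodup_keys_filter _ _ (groups_keys_nodup toks n pos)

theorem kept_mem_pairs (mc n : Int) (toks : List String) (pos : List Int)
    (pr : Int × String) (hpr : pr ∈ pairsOf (bKeptD mc n toks pos).items) :
    pr.2 = bPhraseAt toks n pr.1 ∧ pr.1 ∈ pos := by
  apply groups_mem_pairs toks n pos
  obtain ⟨it, hit, hmem⟩ := List.mem_flatMap.mp hpr
  exact List.mem_flatMap.mpr ⟨it, List.mem_of_mem_filter hit, hmem⟩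

theorem kept_fst_nodup (mc n : Int) (toks : List String) (pos : List Int) (hnd : pos.Nodup) :
    ((pairsOf (bKeptD mc n toks pos).items).map Prod.fst).Nodup := by
  rw [map_fst_pairsOf]
  have hsub : (((bGroups toks n pos).items.filter (keepB mc)).map (fun x => x.2)).flatten.Sublist
      (((bGroups toks n pos).items.map (fun x => x.2)).flatten) :=
    List.Sublist.flatten (List.Sublist.map _ List.filter_sublist)
  exact hsub.nodup (groups_flatten_nodup toks n pos hnd)

theorem set_contains_ofList (l : List Int) (x : Int) :
    PySem.Set.contains (PySem.Set.ofList l) x = l.contains x := by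
  by_cases h : x ∈ l
  · have h1 : x ∈ PySem.Set.ofList l := (PySem.Set.mem_ofList _ _).mpr h
    simp [PySem.Set.contains_eq_listContains, h, h1]
  · have h1 : x ∉ PySem.Set.ofList l := fun hc => h ((PySem.Set.mem_ofList _ _).mp hc)
    simp [PySem.Set.contains_eq_listContains, h, h1]

-- B's per-document step, in terms of A's filter/store and bNewpos
theorem bDocStep_eq (mc n : Int) (acc : List (List String × List Int))
    (pc : PySem.Dict String Int) (toks : List String) (pos : List Int) :
    bDocStep mc n (acc, pc) (toks, pos)
      = (if (filter_act_idx (bGroups toks n pos) mc).size ≠ 0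
           then acc ++ [(toks, bNewpos mc n toks pos)] else acc,
         store_phrase_count pc (filter_act_idx (bGroups toks n pos) mc)) := by
  have hG := groups_keys_nodup toks n pos
  have hfe : filter_act_idx (bGroups toks n pos) mc = bKeptD mc n toks pos :=
    filter_act_idx_eq _ mc hG
  have hKk := kept_keys_nodup mc n toks pos
  -- the combined kept/count fold
  have hkp : (bGroups toks n pos).items.foldl
      (fun (s : PySem.Dict String (List Int) × PySem.Dict String Int) pr =>
        if mc ≤ (pr.2.length : Int) then
          (s.1.insert pr.1 pr.2, s.2.insert pr.1 (s.2.getD pr.1 0 + (pr.2.length : Int)))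
        else s)
      (PySem.Dict.empty, pc)
      = (bKeptD mc n toks pos, store_phrase_count pc (bKeptD mc n toks pos)) := by
    have hbody : (fun (s : PySem.Dict String (List Int) × PySem.Dict String Int) pr =>
        if mc ≤ (pr.2.length : Int) then
          (s.1.insert pr.1 pr.2, s.2.insert pr.1 (s.2.getD pr.1 0 + (pr.2.length : Int)))
        else s)
        = (fun s pr => (if keepB mc pr then s.1.insert pr.1 pr.2 else s.1,
            if keepB mc pr then s.2.insert pr.1 (s.2.getD pr.1 0 + (pr.2.length : Int)) else s.2)) := by
      funext s pr
      by_cases hc : mc ≤ (pr.2.length : Int) <;> simp [keepB, hc]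
    rw [hbody, foldl_pair_split _
      (fun (a : PySem.Dict String (List Int)) pr => if keepB mc pr then a.insert pr.1 pr.2 else a)
      (fun (b : PySem.Dict String Int) pr =>
        if keepB mc pr then b.insert pr.1 (b.getD pr.1 0 + (pr.2.length : Int)) else b)
      PySem.Dict.empty pc]
    refine Prod.ext_iff.mpr ⟨?_, ?_⟩
    · show (List.foldl (fun a pr => if keepB mc pr = true then a.insert pr.1 pr.2 else a)
        PySem.Dict.empty (bGroups toks n pos).items) = _
      rw [← List.foldl_filter]
      apply PySem.Dict.ext
      rw [PySem.Dict.items_foldl_insert_fresh _ Prod.fst Prod.snd PySem.Dict.empty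
        (fun a _ => rfl) (by simpa [PySem.Dict.keys] using hKk)]
      simp [PySem.Dict.empty, bKeptD]
    · show (List.foldl (fun b pr =>
          if keepB mc pr = true then b.insert pr.1 (b.getD pr.1 0 + (pr.2.length : Int)) else b)
        pc (bGroups toks n pos).items) = _
      rw [← List.foldl_filter]
      rw [store_phrase_count, store_eq pc _ hKk]
      rfl
  have hK : (bKeptD mc n toks pos).items.foldl
      (fun (K : PySem.Set Int) pr => pr.2.foldl (fun K p => PySem.Set.add K p) K) PySem.Set.empty
      = PySem.Set.ofList ((pairsOf (bKeptD mc n toks pos).items).map Prod.fst) := by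
    rw [foldl_pairsOf _ (fun (K : PySem.Set Int) q _ => PySem.Set.add K q) PySem.Set.empty]
    rw [← PySem.Set.update_map_eq_foldl_add _ Prod.fst PySem.Set.empty]
    rfl
  unfold bDocStep
  simp only []
  rw [hkp, hfe]
  by_cases hsz : (bKeptD mc n toks pos).size ≠ 0
  · rw [if_pos hsz, if_pos hsz]
    rw [hK]
    rw [foldl_pairsOf _ (fun (np : List Int) q _ =>
      if PySem.Set.contains (PySem.Set.ofList ((pairsOf (bKeptD mc n toks pos).items).map Prod.fst)) (q + 1)
      then np ++ [q] else np) []]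
    have hguard : ∀ (np : List Int), ∀ pr ∈ pairsOf (bKeptD mc n toks pos).items,
        (if PySem.Set.contains (PySem.Set.ofList ((pairsOf (bKeptD mc n toks pos).items).map Prod.fst)) (pr.1 + 1)
         then np ++ [pr.1] else np)
        = (if ((pairsOf (bKeptD mc n toks pos).items).map Prod.fst).contains (pr.1 + 1)
           then np ++ [pr.1] else np) := by
      intro np pr _
      rw [set_contains_ofList]
    rw [PySem.List.foldl_congr_mem _ _ _ _ hguard]
    rw [PySem.List.foldl_append_if
      (fun pr => ((pairsOf (bKeptD mc n toks pos).items).map Prod.fst).contains (pr.1 + 1))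
      Prod.fst _ []]
    rw [List.nil_append]
    rfl
  · rw [if_neg hsz, if_neg hsz]


theorem mem_fst_pairs (mc n : Int) (toks : List String) (pos : List Int) (x : Int)
    (hx : x ∈ (pairsOf (bKeptD mc n toks pos).items).map Prod.fst) : x ∈ pos := by
  obtain ⟨pr, hpr, rfl⟩ := List.mem_map.mp hx
  exact (kept_mem_pairs mc n toks pos pr hpr).2

/-- A's next-level dict over the kept groups is B's grouping of the new positions. -/
theorem next_eq (mc n : Int) (toks : List String) (pos : List Int) (hn : 1 ≤ n)
    (hnd : pos.Nodup)
    (hbd : ∀ p ∈ pos, 0 ≤ p ∧ p.toNat + n.toNat ≤ toks.length) :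
    generate_next_act_idx (bKeptD mc n toks pos) = bGroups toks (n + 1) (bNewpos mc n toks pos) := by
  have hFk := kept_keys_nodup mc n toks pos
  have hA : generate_next_act_idx (bKeptD mc n toks pos)
      = (pairsOf (bKeptD mc n toks pos).items).foldl
          (FA (pairsOf (bKeptD mc n toks pos).items)) PySem.Dict.empty := by
    have h0 : generate_next_act_idx (bKeptD mc n toks pos)
        = GA (pairsOf (bKeptD mc n toks pos).items)
          ((bKeptD mc n toks pos).keys.foldl
            (fun (all : List Int × List String) token =>
              ((bKeptD mc n toks pos).getD token []).foldl
                (fun all idx => (all.1 ++ [idx], all.2 ++ [token])) all)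
            ([], [])) := rfl
    rw [h0, all_eq _ hFk, genfold_eq]
  have hstep : ∀ (nd : PySem.Dict String (List Int)), ∀ pr ∈ pairsOf (bKeptD mc n toks pos).items,
      FA (pairsOf (bKeptD mc n toks pos).items) nd pr
        = (if ((pairsOf (bKeptD mc n toks pos).items).map Prod.fst).contains (pr.1 + 1)
           then nd.modify (bPhraseAt toks (n + 1) pr.1) [] (fun l => l ++ [pr.1]) else nd) := by
    intro nd pr hpr
    by_cases hg : ((pairsOf (bKeptD mc n toks pos).items).map Prod.fst).contains (pr.1 + 1)
    · have hmem : (pr.1 + 1) ∈ (pairsOf (bKeptD mc n toks pos).items).map Prod.fst := by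
        simpa using hg
      have hidx : (PySem.List.index? ((pairsOf (bKeptD mc n toks pos).items).map Prod.fst) (pr.1 + 1)).isSome :=
        (PySem.List.index?_isSome_iff _ _).mpr hmem
      obtain ⟨j, hj⟩ := Option.isSome_iff_exists.mp hidx
      obtain ⟨pre, suf, hps, hlen, -⟩ := (PySem.List.index?_eq_some_iff _ _ _).mp hj
      have hjlt : j < (pairsOf (bKeptD mc n toks pos).items).length := by
        have hl : (((pairsOf (bKeptD mc n toks pos).items).map Prod.fst)).length
            = (pairsOf (bKeptD mc n toks pos).items).length := by simp
        rw [← hl, hps]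
        simp [← hlen]
      have hjget? : ((pairsOf (bKeptD mc n toks pos).items).map Prod.fst)[j]? = some (pr.1 + 1) := by
        rw [hps, ← hlen]
        rw [List.getElem?_append_right (le_refl pre.length)]
        simp
      rw [List.getElem?_map] at hjget?
      have hPjs : (pairsOf (bKeptD mc n toks pos).items)[j]?
          = some ((pairsOf (bKeptD mc n toks pos).items)[j]'hjlt) := List.getElem?_eq_getElem hjlt
      rw [hPjs] at hjget?
      have hprj1 : ((pairsOf (bKeptD mc n toks pos).items)[j]'hjlt).1 = pr.1 + 1 := by
        simpa using hjget?
      have hprjmem : (pairsOf (bKeptD mc n toks pos).items)[j]'hjlt ∈ pairsOf (bKeptD mc n toks pos).items :=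
        List.getElem_mem _
      have hsnd : PySem.List.pyGetD ((pairsOf (bKeptD mc n toks pos).items).map Prod.snd) ((j : Nat) : Int) ""
          = ((pairsOf (bKeptD mc n toks pos).items)[j]'hjlt).2 := by
        rw [PySem.List.pyGetD_of_nonneg _ _ (by positivity), Int.toNat_natCast]
        rw [List.getD_eq_getElem _ _ (by simpa using hjlt)]
        simp
      obtain ⟨hpr2, hpr1pos⟩ := kept_mem_pairs mc n toks pos pr hpr
      obtain ⟨hprj2, hprjpos⟩ := kept_mem_pairs mc n toks pos _ hprjmem
      have h0p : 0 ≤ pr.1 := (hbd pr.1 hpr1pos).1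
      have hsuccpos : pr.1 + 1 ∈ pos := by
        rw [← hprj1]
        exact hprjpos
      have hblt : pr.1.toNat + n.toNat < toks.length := by
        have h2 := (hbd (pr.1 + 1) hsuccpos).2
        omega
      show (if ((pairsOf (bKeptD mc n toks pos).items).map Prod.fst).contains (pr.1 + 1) then _ else nd) = _
      rw [if_pos hg, if_pos hg]
      rw [hj]
      simp only [Option.getD_some]
      rw [hsnd, merge_eq, setdefault_modify]
      rw [hpr2, hprj2, hprj1]
      rw [phrase_merge toks n pr.1 hn h0p hblt]
    · show (if ((pairsOf (bKeptD mc n toks pos).items).map Prod.fst).contains (pr.1 + 1) then _ else nd) = _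
      rw [if_neg hg, if_neg hg]
  rw [hA, PySem.List.foldl_congr_mem _ _ _ _ hstep]
  have hB : bGroups toks (n + 1) (bNewpos mc n toks pos)
      = (((pairsOf (bKeptD mc n toks pos).items).filter
            (fun pr => ((pairsOf (bKeptD mc n toks pos).items).map Prod.fst).contains (pr.1 + 1))).map Prod.fst).foldl
          (fun g p => g.modify (bPhraseAt toks (n + 1) p) [] (fun l => l ++ [p])) PySem.Dict.empty := rfl
  rw [hB, List.foldl_map, ← List.foldl_filter]

theorem newpos_nodup (mc n : Int) (toks : List String) (pos : List Int) (hnd : pos.Nodup) :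
    (bNewpos mc n toks pos).Nodup := by
  have hsub : (bNewpos mc n toks pos).Sublist
      ((pairsOf (bKeptD mc n toks pos).items).map Prod.fst) :=
    List.Sublist.map Prod.fst List.filter_sublist
  exact hsub.nodup (kept_fst_nodup mc n toks pos hnd)

theorem newpos_bounds (mc n : Int) (toks : List String) (pos : List Int) (hn : 1 ≤ n)
    (hbd : ∀ p ∈ pos, 0 ≤ p ∧ p.toNat + n.toNat ≤ toks.length) :
    ∀ p ∈ bNewpos mc n toks pos, 0 ≤ p ∧ p.toNat + (n + 1).toNat ≤ toks.length := by
  intro p hp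
  obtain ⟨pr, hprf, rfl⟩ := List.mem_map.mp hp
  obtain ⟨hprP, hg⟩ := List.mem_filter.mp hprf
  have hppos := (kept_mem_pairs mc n toks pos pr hprP).2
  have h0 := (hbd _ hppos).1
  have hsucc : pr.1 + 1 ∈ pos := mem_fst_pairs mc n toks pos _ (by simpa using hg)
  have h2 := (hbd _ hsucc).2
  exact ⟨h0, by omega⟩


-- ---- the per-round and whole-loop correspondence ----

/-- current level dict of document `i` -/
def ActOf (dai : List (List (PySem.Dict String (List Int)))) (n : Int) (i : Int) :
    PySem.Dict String (List Int) :=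
  PySem.List.pyGetD (PySem.List.pyGetD dai i []) n PySem.Dict.empty

def aBodyF (mc n : Int) :
    (PySem.Dict String Int × List (List (PySem.Dict String (List Int))) × List Int) → Int →
    (PySem.Dict String Int × List (List (PySem.Dict String (List Int))) × List Int) :=
  fun st i =>
    let hist := PySem.List.pyGetD st.2.1 i []
    let n_act_idx := filter_act_idx (PySem.List.pyGetD hist n PySem.Dict.empty) mc
    let hist := PySem.List.pySetD hist n n_act_idx
    let pc := store_phrase_count st.1 n_act_idx
    if n_act_idx.size ≠ 0 then
      (pc, PySem.List.pySetD st.2.1 i (hist ++ [generate_next_act_idx n_act_idx]), st.2.2)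
    else
      (pc, PySem.List.pySetD st.2.1 i hist, st.2.2 ++ [i])

def keepI (mc n : Int) (dai : List (List (PySem.Dict String (List Int)))) (i : Int) : Bool :=
  decide ((filter_act_idx (ActOf dai n i) mc).size ≠ 0)

/-- A's level-`n` dict of a document is B's grouping of its live entry. -/
def DocRel (n : Int) (d : PySem.Dict String (List Int)) (e : List String × List Int) : Prop :=
  d = bGroups e.1 (n + 1) e.2 ∧ e.2.Nodup ∧
    ∀ p ∈ e.2, 0 ≤ p ∧ p.toNat + (n + 1).toNat ≤ e.1.length

/-- one full round over the active documents: A's fold and B's fold correspond -/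
theorem roundEq (mc n : Int) (hn : 0 ≤ n) :
    ∀ (dl : List Int) (pc : PySem.Dict String Int)
      (dai : List (List (PySem.Dict String (List Int)))) (ddl : List Int)
      (accB : List (List String × List Int)) (f : Int → List String × List Int),
    dl.Nodup →
    (∀ i ∈ dl, 0 ≤ i ∧ i.toNat < dai.length ∧
      (PySem.List.pyGetD dai i []).length = n.toNat + 1 ∧ DocRel n (ActOf dai n i) (f i)) →
    (dl.foldl (aBodyF mc n) (pc, dai, ddl)).1
        = ((dl.map f).foldl (bDocStep mc (n + 1)) (accB, pc)).2
    ∧ ((dl.map f).foldl (bDocStep mc (n + 1)) (accB, pc)).1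
        = accB ++ (dl.filter (keepI mc n dai)).map
            (fun i => ((f i).1, bNewpos mc (n + 1) (f i).1 (f i).2))
    ∧ (dl.foldl (aBodyF mc n) (pc, dai, ddl)).2.2 = ddl ++ dl.filter (fun i => !keepI mc n dai i)
    ∧ (dl.foldl (aBodyF mc n) (pc, dai, ddl)).2.1.length = dai.length
    ∧ (∀ j : Int, 0 ≤ j → j ∉ dl →
        PySem.List.pyGetD (dl.foldl (aBodyF mc n) (pc, dai, ddl)).2.1 j []
          = PySem.List.pyGetD dai j [])
    ∧ (∀ i ∈ dl, keepI mc n dai i = true →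
        (PySem.List.pyGetD (dl.foldl (aBodyF mc n) (pc, dai, ddl)).2.1 i []).length = n.toNat + 2
        ∧ DocRel (n + 1) (ActOf (dl.foldl (aBodyF mc n) (pc, dai, ddl)).2.1 (n + 1) i)
            ((f i).1, bNewpos mc (n + 1) (f i).1 (f i).2)) := by
  intro dl
  induction dl with
  | nil => intro pc dai ddl accB f _ _; simp
  | cons i rest ih =>
    intro pc dai ddl accB f hnd hinv
    obtain ⟨hi0, hilen, hhlen, hrel⟩ := hinv i (List.mem_cons_self)
    obtain ⟨hdict, hnd2, hbd2⟩ := hrel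
    obtain ⟨hirest, hndrest⟩ := List.nodup_cons.mp hnd
    have hn1 : (1 : Int) ≤ n + 1 := by omega
    -- A's head step
    have hstepA : aBodyF mc n (pc, dai, ddl) i =
        (store_phrase_count pc (filter_act_idx (ActOf dai n i) mc),
         (if keepI mc n dai i then
            PySem.List.pySetD dai i
              ((PySem.List.pySetD (PySem.List.pyGetD dai i []) n (filter_act_idx (ActOf dai n i) mc))
                ++ [generate_next_act_idx (filter_act_idx (ActOf dai n i) mc)])
          else
            PySem.List.pySetD dai i
              (PySem.List.pySetD (PySem.List.pyGetD dai i []) n (filter_act_idx (ActOf dai n i) mc))),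
         (if keepI mc n dai i then ddl else ddl ++ [i])) := by
      show (if (filter_act_idx (ActOf dai n i) mc).size ≠ 0 then
          (store_phrase_count pc (filter_act_idx (ActOf dai n i) mc),
           PySem.List.pySetD dai i
             ((PySem.List.pySetD (PySem.List.pyGetD dai i []) n (filter_act_idx (ActOf dai n i) mc))
               ++ [generate_next_act_idx (filter_act_idx (ActOf dai n i) mc)]),
           ddl)
        else
          (store_phrase_count pc (filter_act_idx (ActOf dai n i) mc),
           PySem.List.pySetD dai i
             (PySem.List.pySetD (PySem.List.pyGetD dai i []) n (filter_act_idx (ActOf dai n i) mc)),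
           ddl ++ [i])) = _
      unfold keepI
      by_cases hk : (filter_act_idx (ActOf dai n i) mc).size ≠ 0 <;> simp [hk]
    -- B's head step
    have hfeq : filter_act_idx (ActOf dai n i) mc = bKeptD mc (n + 1) (f i).1 (f i).2 := by
      rw [hdict]
      exact filter_act_idx_eq _ mc (groups_keys_nodup _ _ _)
    have hstepB : bDocStep mc (n + 1) (accB, pc) (f i) =
        ((if keepI mc n dai i then accB ++ [((f i).1, bNewpos mc (n + 1) (f i).1 (f i).2)] else accB),
         store_phrase_count pc (filter_act_idx (ActOf dai n i) mc)) := by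
      have h := bDocStep_eq mc (n + 1) accB pc (f i).1 (f i).2
      rw [← hdict] at h
      rw [h]
      unfold keepI
      by_cases hk : (filter_act_idx (ActOf dai n i) mc).size ≠ 0 <;> simp [hk]
    -- the generated next dict, when the document survives
    have hnext : keepI mc n dai i = true →
        generate_next_act_idx (filter_act_idx (ActOf dai n i) mc)
          = bGroups (f i).1 (n + 1 + 1) (bNewpos mc (n + 1) (f i).1 (f i).2) := by
      intro _
      rw [hfeq]
      exact next_eq mc (n + 1) (f i).1 (f i).2 hn1 hnd2 hbd2
    -- names for the post-head state
    set F := filter_act_idx (ActOf dai n i) mc with hF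
    set pc1 := store_phrase_count pc F with hpc1
    set daiA := (if keepI mc n dai i then
            PySem.List.pySetD dai i
              ((PySem.List.pySetD (PySem.List.pyGetD dai i []) n F) ++ [generate_next_act_idx F])
          else PySem.List.pySetD dai i (PySem.List.pySetD (PySem.List.pyGetD dai i []) n F)) with hdaiA
    set ddlA := (if keepI mc n dai i then ddl else ddl ++ [i]) with hddlA
    set accB1 := (if keepI mc n dai i then accB ++ [((f i).1, bNewpos mc (n + 1) (f i).1 (f i).2)] else accB) with haccB1
    have hlenA : daiA.length = dai.length := by
      rw [hdaiA]; by_cases hk : keepI mc n dai i <;> simp [hk, PySem.List.length_pySetD]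
    have hotherA : ∀ j : Int, 0 ≤ j → j ≠ i → PySem.List.pyGetD daiA j [] = PySem.List.pyGetD dai j [] := by
      intro j hj0 hji
      have hset : ∀ (v : List (PySem.Dict String (List Int))),
          PySem.List.pyGetD (PySem.List.pySetD dai i v) j [] = PySem.List.pyGetD dai j [] := by
        intro v
        rw [PySem.List.pySetD_of_nonneg _ _ hi0, PySem.List.pyGetD_of_nonneg _ _ hj0,
          PySem.List.pyGetD_of_nonneg _ _ hj0]
        rw [List.getD_eq_getElem?_getD, List.getD_eq_getElem?_getD,
          List.getElem?_set_ne (by omega)]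
      rw [hdaiA]; by_cases hk : keepI mc n dai i <;> simp [hk, hset]
    have hselfA : keepI mc n dai i = true →
        PySem.List.pyGetD daiA i []
          = (PySem.List.pySetD (PySem.List.pyGetD dai i []) n F) ++ [generate_next_act_idx F] := by
      intro hk
      rw [hdaiA, if_pos hk]
      rw [PySem.List.pySetD_of_nonneg _ _ hi0, PySem.List.pyGetD_of_nonneg _ _ hi0]
      rw [List.getD_eq_getElem?_getD, List.getElem?_set_self (by omega)]
      rfl
    -- invariants for the tail
    have hactEq : ∀ j ∈ rest, ActOf daiA n j = ActOf dai n j := by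
      intro j hj
      have hji : j ≠ i := fun h => hirest (h ▸ hj)
      unfold ActOf
      rw [hotherA j (hinv j (List.mem_cons_of_mem _ hj)).1 hji]
    have hkeepEq : ∀ j ∈ rest, keepI mc n daiA j = keepI mc n dai j := by
      intro j hj
      unfold keepI
      rw [hactEq j hj]
    have hinvrest : ∀ j ∈ rest, 0 ≤ j ∧ j.toNat < daiA.length ∧
        (PySem.List.pyGetD daiA j []).length = n.toNat + 1 ∧ DocRel n (ActOf daiA n j) (f j) := by
      intro j hj
      obtain ⟨h1, h2, h3, h4⟩ := hinv j (List.mem_cons_of_mem _ hj)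
      have hji : j ≠ i := fun h => hirest (h ▸ hj)
      exact ⟨h1, by omega, by rw [hotherA j h1 hji]; exact h3, by rw [hactEq j hj]; exact h4⟩
    have hfilterEq : rest.filter (keepI mc n daiA) = rest.filter (keepI mc n dai) :=
      List.filter_congr hkeepEq
    have hfilterEq' : rest.filter (fun j => !keepI mc n daiA j) = rest.filter (fun j => !keepI mc n dai j) :=
      List.filter_congr (by intro j hj; rw [hkeepEq j hj])
    obtain ⟨ih1, ih2, ih3, ih4, ih5, ih6⟩ := ih pc1 daiA ddlA accB1 f hndrest hinvrest
    -- unfold one step of the two folds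
    have hA : (i :: rest).foldl (aBodyF mc n) (pc, dai, ddl)
        = rest.foldl (aBodyF mc n) (pc1, daiA, ddlA) := by
      rw [List.foldl_cons, hstepA]
    have hB : ((i :: rest).map f).foldl (bDocStep mc (n + 1)) (accB, pc)
        = (rest.map f).foldl (bDocStep mc (n + 1)) (accB1, pc1) := by
      rw [List.map_cons, List.foldl_cons, hstepB]
    refine ⟨?_, ?_, ?_, ?_, ?_, ?_⟩
    · rw [hA, hB]; exact ih1
    · rw [hB, ih2]
      rw [show rest.filter (keepI mc n daiA) = rest.filter (keepI mc n dai) from hfilterEq]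
      have hmapEq : (rest.filter (keepI mc n dai)).map
            (fun i => ((f i).1, bNewpos mc (n + 1) (f i).1 (f i).2))
          = (rest.filter (keepI mc n dai)).map
            (fun i => ((f i).1, bNewpos mc (n + 1) (f i).1 (f i).2)) := rfl
      rw [haccB1]
      by_cases hk : keepI mc n dai i <;>
        simp [hk, List.filter_cons, List.append_assoc]
    · rw [hA, ih3, hfilterEq', hddlA]
      by_cases hk : keepI mc n dai i <;>
        simp [hk, List.filter_cons, List.append_assoc]
    · rw [hA, ih4, hlenA]
    · intro j hj0 hj
      have hjr : j ∉ rest := fun h => hj (List.mem_cons_of_mem _ h)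
      have hji : j ≠ i := fun h => hj (h ▸ List.mem_cons_self)
      rw [hA, ih5 j hj0 hjr, hotherA j hj0 hji]
    · intro i' hi' hkeep
      rcases List.mem_cons.mp hi' with hii | hir
      · subst hii
        have hkA := hselfA hkeep
        have hlenn : (PySem.List.pySetD (PySem.List.pyGetD dai i' []) n F).length = n.toNat + 1 := by
          rw [PySem.List.length_pySetD, hhlen]
        have hentry : PySem.List.pyGetD ((i' :: rest).foldl (aBodyF mc n) (pc, dai, ddl)).2.1 i' []
            = (PySem.List.pySetD (PySem.List.pyGetD dai i' []) n F) ++ [generate_next_act_idx F] := by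
          rw [hA, ih5 i' hi0 hirest, hkA]
        refine ⟨?_, ?_, ?_, ?_⟩
        · rw [hentry]; simp [hlenn]
        · unfold ActOf
          rw [hentry]
          rw [PySem.List.pyGetD_of_nonneg _ _ (by omega)]
          rw [List.getD_eq_getElem?_getD]
          have hidx : (n + 1).toNat = (PySem.List.pySetD (PySem.List.pyGetD dai i' []) n F).length := by
            rw [hlenn]; omega
          rw [hidx, List.getElem?_concat_length]
          simpa using hnext hkeep
        · exact newpos_nodup mc (n + 1) (f i').1 (f i').2 hnd2
        · exact newpos_bounds mc (n + 1) (f i').1 (f i').2 hn1 hbd2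
      · have := ih6 i' hir (by rw [hkeepEq i' hir]; exact hkeep)
        rw [hA]
        exact this

theorem init_eq (toks : List String) :
    generate_act_idx_init toks = bGroups toks 1 (PySem.List.pyRange 0 (toks.length : Int) 1) := by
  unfold generate_act_idx_init bGroups
  apply PySem.List.foldl_congr_mem
  intro act i hi
  obtain ⟨h0, _⟩ := PySem.List.mem_pyRange_one.mp hi
  show (if act.contains (PySem.List.pyGetD toks i "") then act
      else act.insert (PySem.List.pyGetD toks i "") []).modify
      (PySem.List.pyGetD toks i "") [] (fun l => l ++ [i]) = _
  rw [setdefault_modify]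
  rw [phrase_one toks i h0]

theorem loopEq (mc : Int) : ∀ (fuel : Nat) (dl ddl : List Int) (pc : PySem.Dict String Int)
    (dai : List (List (PySem.Dict String (List Int)))) (n : Int) (f : Int → List String × List Int),
    0 ≤ n → dl.Nodup →
    (∀ i ∈ dl, ddl.contains i = false) →
    (∀ i ∈ dl, 0 ≤ i ∧ i.toNat < dai.length ∧
      (PySem.List.pyGetD dai i []).length = n.toNat + 1 ∧ DocRel n (ActOf dai n i) (f i)) →
    fpmLoop mc fuel dl ddl pc dai n = bLoop mc fuel (dl.map f) (n + 1) pc := by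
  intro fuel
  induction fuel with
  | zero => intros; rfl
  | succ fuel ih =>
    intro dl ddl pc dai n f hn hnd hddl hinv
    by_cases hdl : dl.length ≠ 0
    · obtain ⟨r1, r2, r3, r4, r5, r6⟩ := roundEq mc n hn dl pc dai ddl [] f hnd hinv
      have hfpm : fpmLoop mc (fuel + 1) dl ddl pc dai n =
          fpmLoop mc fuel
            (dl.filter (fun i => !(dl.foldl (aBodyF mc n) (pc, dai, ddl)).2.2.contains i))
            (dl.foldl (aBodyF mc n) (pc, dai, ddl)).2.2
            (dl.foldl (aBodyF mc n) (pc, dai, ddl)).1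
            (dl.foldl (aBodyF mc n) (pc, dai, ddl)).2.1 (n + 1) := by
        show (if dl.length ≠ 0 then
            fpmLoop mc fuel
              (dl.filter (fun i => !(dl.foldl (aBodyF mc n) (pc, dai, ddl)).2.2.contains i))
              (dl.foldl (aBodyF mc n) (pc, dai, ddl)).2.2
              (dl.foldl (aBodyF mc n) (pc, dai, ddl)).1
              (dl.foldl (aBodyF mc n) (pc, dai, ddl)).2.1 (n + 1)
          else pc) = _
        rw [if_pos hdl]
      have hblo : bLoop mc (fuel + 1) (dl.map f) (n + 1) pc =
          bLoop mc fuel ((dl.map f).foldl (bDocStep mc (n + 1)) ([], pc)).1 (n + 1 + 1)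
            ((dl.map f).foldl (bDocStep mc (n + 1)) ([], pc)).2 := by
        show (if (dl.map f).length ≠ 0 then
            bLoop mc fuel ((dl.map f).foldl (bDocStep mc (n + 1)) ([], pc)).1 (n + 1 + 1)
              ((dl.map f).foldl (bDocStep mc (n + 1)) ([], pc)).2
          else pc) = _
        rw [if_pos (by simpa using hdl)]
      rw [hfpm, hblo]
      -- the surviving documents
      have hdl' : dl.filter (fun i => !(dl.foldl (aBodyF mc n) (pc, dai, ddl)).2.2.contains i)
          = dl.filter (keepI mc n dai) := by
        apply List.filter_congr
        intro j hj
        rw [r3]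
        have h1 : ddl.contains j = false := hddl j hj
        cases hkeep : keepI mc n dai j with
        | true =>
          have : j ∉ dl.filter (fun i => !keepI mc n dai i) := by
            intro hmem
            have := (List.mem_filter.mp hmem).2
            simp [hkeep] at this
          have hnotin : j ∉ ddl := by simpa using h1
          simp [hnotin, this]
        | false =>
          have : j ∈ dl.filter (fun i => !keepI mc n dai i) :=
            List.mem_filter.mpr ⟨hj, by simp [hkeep]⟩
          simp [this]
      rw [hdl']
      -- the new active list
      have hactive : ((dl.map f).foldl (bDocStep mc (n + 1)) ([], pc)).1
          = (dl.filter (keepI mc n dai)).map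
              (fun i => ((f i).1, bNewpos mc (n + 1) (f i).1 (f i).2)) := by
        rw [r2, List.nil_append]
      rw [hactive, ← r1]
      -- recursive call, with the new per-document entries
      have hcall := ih (dl.filter (keepI mc n dai))
        (dl.foldl (aBodyF mc n) (pc, dai, ddl)).2.2
        (dl.foldl (aBodyF mc n) (pc, dai, ddl)).1
        (dl.foldl (aBodyF mc n) (pc, dai, ddl)).2.1
        (n + 1)
        (fun i => ((f i).1, bNewpos mc (n + 1) (f i).1 (f i).2))
        (by omega)
        (hnd.filter _)
        (by
          intro j hj
          obtain ⟨hjd, hjk⟩ := List.mem_filter.mp hj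
          rw [r3]
          have : j ∉ dl.filter (fun i => !keepI mc n dai i) := by
            intro hmem
            have := (List.mem_filter.mp hmem).2
            simp [hjk] at this
          have hnotin : j ∉ ddl := by simpa using hddl j hjd
          simp [hnotin, this])
        (by
          intro j hj
          obtain ⟨hjd, hjk⟩ := List.mem_filter.mp hj
          obtain ⟨h1, h2, h3, h4⟩ := hinv j hjd
          obtain ⟨g1, g2⟩ := r6 j hjd hjk
          refine ⟨h1, by rw [r4]; omega, by rw [g1]; omega, g2⟩)
      rw [hcall]
    · have hdl0 : dl = [] := by
        cases dl with
        | nil => rfl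
        | cons a l => simp at hdl
      subst hdl0
      show (if (0 : Nat) ≠ 0 then _ else pc) = bLoop mc (fuel + 1) [] (n + 1) pc
      simp [bLoop]

theorem main_eq (docs : List (List String)) (mc : Int) :
    extract_phrases_v2 docs mc = extract_phrases_v2_alt docs mc := by
  have hdai0 : (PySem.List.pyRange 0 (docs.length : Int) 1).foldl
      (fun dai i => dai ++ [[generate_act_idx_init (PySem.List.pyGetD docs i [])]]) []
      = (PySem.List.pyRange 0 (docs.length : Int) 1).map
          (fun i => [generate_act_idx_init (PySem.List.pyGetD docs i [])]) := by
    rw [PySem.List.foldl_append_singleton_eq_map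
      (fun i => [generate_act_idx_init (PySem.List.pyGetD docs i [])]) _ []]
    simp
  have hactB : docs.foldl
      (fun a toks => a ++ [(toks, PySem.List.pyRange 0 (toks.length : Int) 1)]) []
      = docs.map (fun toks => (toks, PySem.List.pyRange 0 (toks.length : Int) 1)) := by
    rw [PySem.List.foldl_append_singleton_eq_map
      (fun toks => (toks, PySem.List.pyRange 0 (toks.length : Int) 1)) docs []]
    simp
  have hget0 : ∀ i : Int, 0 ≤ i → i < (docs.length : Int) →
      PySem.List.pyGetD ((PySem.List.pyRange 0 (docs.length : Int) 1).map
        (fun i => [generate_act_idx_init (PySem.List.pyGetD docs i [])])) i []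
      = [generate_act_idx_init (PySem.List.pyGetD docs i [])] :=
    fun i h1 h2 => PySem.List.pyGetD_map_pyRange_of_nonneg _ _ i _ h1 h2
  have hinv0 : ∀ i ∈ PySem.List.pyRange 0 (docs.length : Int) 1, 0 ≤ i ∧
      i.toNat < ((PySem.List.pyRange 0 (docs.length : Int) 1).map
        (fun i => [generate_act_idx_init (PySem.List.pyGetD docs i [])])).length ∧
      (PySem.List.pyGetD ((PySem.List.pyRange 0 (docs.length : Int) 1).map
        (fun i => [generate_act_idx_init (PySem.List.pyGetD docs i [])])) i []).length
        = (0 : Int).toNat + 1 ∧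
      DocRel 0 (ActOf ((PySem.List.pyRange 0 (docs.length : Int) 1).map
        (fun i => [generate_act_idx_init (PySem.List.pyGetD docs i [])])) 0 i)
        ((fun i => (PySem.List.pyGetD docs i [],
          PySem.List.pyRange 0 ((PySem.List.pyGetD docs i []).length : Int) 1)) i) := by
    intro i hi
    obtain ⟨h1, h2⟩ := PySem.List.mem_pyRange_one.mp hi
    have hlenr : ((PySem.List.pyRange 0 (docs.length : Int) 1).map
        (fun i => [generate_act_idx_init (PySem.List.pyGetD docs i [])])).length = docs.length := by
      simp [PySem.List.length_pyRange_one]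
    have hAct : ActOf ((PySem.List.pyRange 0 (docs.length : Int) 1).map
        (fun i => [generate_act_idx_init (PySem.List.pyGetD docs i [])])) 0 i
        = generate_act_idx_init (PySem.List.pyGetD docs i []) := by
      unfold ActOf
      rw [hget0 i h1 h2]
      rfl
    refine ⟨h1, by omega, by rw [hget0 i h1 h2]; rfl, ?_, ?_, ?_⟩
    · rw [hAct, init_eq]
      norm_num
    · exact PySem.List.nodup_pyRange_one _ _
    · intro p hp
      obtain ⟨hp1, hp2⟩ := PySem.List.mem_pyRange_one.mp hp
      constructor
      · exact hp1
      · simp only []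
        omega
  have hloop := loopEq mc (docs.foldl (fun a d => a + d.length) 0 + 2)
    (PySem.List.pyRange 0 (docs.length : Int) 1) []
    PySem.Dict.empty
    ((PySem.List.pyRange 0 (docs.length : Int) 1).map
      (fun i => [generate_act_idx_init (PySem.List.pyGetD docs i [])]))
    0
    (fun i => (PySem.List.pyGetD docs i [],
      PySem.List.pyRange 0 ((PySem.List.pyGetD docs i []).length : Int) 1))
    (le_refl 0) (PySem.List.nodup_pyRange_one _ _) (fun i _ => rfl) hinv0
  have hmap : (PySem.List.pyRange 0 (docs.length : Int) 1).map
      (fun i => (PySem.List.pyGetD docs i [],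
        PySem.List.pyRange 0 ((PySem.List.pyGetD docs i []).length : Int) 1))
      = docs.map (fun toks => (toks, PySem.List.pyRange 0 (toks.length : Int) 1)) := by
    have h2 : (PySem.List.pyRange 0 (docs.length : Int) 1).map
        (fun i => PySem.List.pyGetD docs i []) = docs := by
      have := PySem.List.map_pyGetD_pyRange_zero docs []
      simpa [PySem.List.len_eq] using this
    calc (PySem.List.pyRange 0 (docs.length : Int) 1).map
          (fun i => (PySem.List.pyGetD docs i [],
            PySem.List.pyRange 0 ((PySem.List.pyGetD docs i []).length : Int) 1))
        = ((PySem.List.pyRange 0 (docs.length : Int) 1).map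
            (fun i => PySem.List.pyGetD docs i [])).map
              (fun toks => (toks, PySem.List.pyRange 0 (toks.length : Int) 1)) := by
          rw [List.map_map]; rfl
      _ = _ := by rw [h2]
  show (fpmLoop mc (docs.foldl (fun a d => a + d.length) 0 + 2)
      (PySem.List.pyRange 0 (docs.length : Int) 1) [] PySem.Dict.empty
      ((PySem.List.pyRange 0 (docs.length : Int) 1).foldl
        (fun dai i => dai ++ [[generate_act_idx_init (PySem.List.pyGetD docs i [])]]) []) 0).items
    = (bLoop mc (docs.foldl (fun a d => a + d.length) 0 + 2)
      (docs.foldl (fun a toks => a ++ [(toks, PySem.List.pyRange 0 (toks.length : Int) 1)]) [])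
      1 PySem.Dict.empty).items
  rw [hdai0, hactB, hloop, hmap]
  norm_num

-- ===== VERDICT (by name: the statement is the Claim_ definition above) =====
theorem extract_phrases_v2_spec : Claim_equal_extract_phrases_v2 := by
  intro docs mc _
  show extract_phrases_v2 docs mc = extract_phrases_v2_alt docs mc
  exact main_eq docs mc
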